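-- pv_equiv track=rewrite | github.com/Heo-jieun/Coding_Test_Problem | 프로그래머스/unrated/181932. 코드 처리하기/코드 처리하기.py | solution
-- ===== SOURCE A (Python) =====
-- def solution(code):
--     ret = ""
--     mode = 0
--     for i in range(len(code)) :
--         if code[i] == '1':
--             if mode == 1:
--                 mode = 0
--             else :
--                 mode = 1
--         elif mode == 1:
--             if i%2 != 0 :
--                 ret += code[i]
--         else :
--             if i%2 == 0 :
--                 ret += code[i]
--     return "EMPTY" if len(ret) == 0 else ret
-- ===== SOURCE B (Python) =====
-- def solution(code):
--     # prefix[i] = number of '1' characters in code[0:i]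
--     prefix = []
--     ones = 0
--     for ch in code:
--         prefix.append(ones)
--         if ch == '1':
--             ones += 1
--     kept = [ch for i, ch in enumerate(code)
--             if ch != '1' and (prefix[i] + i) % 2 == 0]
--     res = "".join(kept)
--     return res if res else "EMPTY"
-- ===== Notes on version B (the rewrite author's own statement) =====
-- stated objective: alternative
-- what changed: Replaces the inline toggling mode flag with a precomputed prefix table of cumulative toggle-digit counts and a single comprehension keeping a non-toggle character at index i exactly when prefix[i]+i is even.
import Mathlib
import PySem

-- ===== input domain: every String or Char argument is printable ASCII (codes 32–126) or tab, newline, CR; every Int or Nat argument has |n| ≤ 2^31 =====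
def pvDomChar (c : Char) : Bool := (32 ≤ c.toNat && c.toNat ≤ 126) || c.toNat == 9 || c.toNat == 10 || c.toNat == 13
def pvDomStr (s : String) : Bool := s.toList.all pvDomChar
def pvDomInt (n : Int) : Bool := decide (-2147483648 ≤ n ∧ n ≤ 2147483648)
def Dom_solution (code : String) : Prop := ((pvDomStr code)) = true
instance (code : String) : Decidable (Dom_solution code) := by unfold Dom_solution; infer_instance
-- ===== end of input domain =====

-- B replaces A's inline toggling mode flag with a precomputed prefix table of toggle-digit counts; alternative decomposition, same cost.

-- ===== PORT A =====
-- A's loop 'for i in range(len(code))' reading code[i]: a foldl over the indexed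
-- characters (PySem.List.enumerate), state (ret, mode) exactly as in the Python.
def solutionStep (st : List Char × Nat) (ic : Int × Char) : List Char × Nat :=
  match st, ic with
  | (ret, mode), (i, c) =>
    if c = '1' then
      (ret, if mode = 1 then 0 else 1)
    else if mode = 1 then
      (if i % 2 ≠ 0 then ret ++ [c] else ret, mode)
    else
      (if i % 2 = 0 then ret ++ [c] else ret, mode)

def solutionFinish (ret : List Char) : String :=
  if ret.length = 0 then "EMPTY" else String.ofList ret

def solution (code : String) : String :=
  solutionFinish ((PySem.List.enumerate code.toList 0).foldl solutionStep ([], 0)).1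

-- ===== PORT B =====
-- prefix table: bPref s ones = running count of '1's (seeded with ones) before each index
def bPref : List Char → Nat → List Nat
  | [], _ => []
  | c :: cs, ones => ones :: bPref cs (if c = '1' then ones + 1 else ones)

-- the comprehension: zip the enumerated characters with the prefix table, keep by the rule
def altKept (s : List Char) : List Char :=
  ((PySem.List.enumerate s 0).zip (bPref s 0)).filterMap
    (fun p => if p.1.2 ≠ '1' ∧ ((p.2 : Int) + p.1.1) % 2 = 0 then some p.1.2 else none)

def solution_alt (code : String) : String :=
  if altKept code.toList = [] then "EMPTY" else String.ofList (altKept code.toList)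

-- ===== PRECONDITION & SPEC =====
def Spec_solution (code : String) (out : String) : Prop := out = solution_alt code
instance (code : String) (out : String) : Decidable (Spec_solution code out) := by unfold Spec_solution; infer_instance

-- ===== CLAIM (what is proved, stated in full; the proofs are below) =====
def Claim_equal_solution : Prop := ∀ (code : String), Dom_solution code → Spec_solution code (solution code)

-- ===== LEMMAS AND PROOFS =====

-- B's kept list, as a direct recursion over the characters with start index i and ones count
def bKept : List Char → Int → Nat → List Char
  | [], _, _ => []
  | c :: cs, i, ones =>
    if c ≠ '1' ∧ ((ones : Int) + i) % 2 = 0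
    then c :: bKept cs (i + 1) (if c = '1' then ones + 1 else ones)
    else bKept cs (i + 1) (if c = '1' then ones + 1 else ones)

lemma zip_bPref_eq_bKept (cs : List Char) (i : Int) (ones : Nat) :
    ((PySem.List.enumerate cs i).zip (bPref cs ones)).filterMap
      (fun p => if p.1.2 ≠ '1' ∧ ((p.2 : Int) + p.1.1) % 2 = 0 then some p.1.2 else none)
    = bKept cs i ones := by
  induction cs generalizing i ones with
  | nil => simp [PySem.List.enumerate_nil, bKept]
  | cons c cs ih =>
    simp only [PySem.List.enumerate_cons, bPref, List.zip_cons_cons, List.filterMap_cons]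
    rw [ih]
    simp only [bKept]
    by_cases h : c ≠ '1' ∧ ((ones : Int) + i) % 2 = 0
    · rw [if_pos h, if_pos h]
    · rw [if_neg h, if_neg h]

-- A's fold appends to the accumulator; characterize it via bKept, with mode = ones % 2
lemma foldl_solutionStep (cs : List Char) (i : Int) (ones : Nat) (acc : List Char) :
    ((PySem.List.enumerate cs i).foldl solutionStep (acc, ones % 2)).1
    = acc ++ bKept cs i ones := by
  induction cs generalizing i ones acc with
  | nil => simp [PySem.List.enumerate_nil, bKept]
  | cons c cs ih =>
    simp only [PySem.List.enumerate_cons, List.foldl_cons]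
    by_cases h1 : c = '1'
    · have hs : solutionStep (acc, ones % 2) (i, c) = (acc, (ones + 1) % 2) := by
        simp only [solutionStep, if_pos h1]
        by_cases hp : ones % 2 = 1 <;> simp [hp] <;> omega
      rw [hs, ih]
      have : bKept (c :: cs) i ones = bKept cs (i + 1) (ones + 1) := by
        simp [bKept, h1]
      rw [this]
    · have hs : solutionStep (acc, ones % 2) (i, c)
          = ((if ((ones : Int) + i) % 2 = 0 then acc ++ [c] else acc), ones % 2) := by
        simp only [solutionStep, if_neg h1]
        by_cases hp : ones % 2 = 1
        · rw [if_pos hp]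
          by_cases h2 : ((ones : Int) + i) % 2 = 0
          · rw [if_pos h2, if_pos (show i % 2 ≠ 0 by omega)]
          · rw [if_neg h2, if_neg (show ¬ i % 2 ≠ 0 by omega)]
        · rw [if_neg hp]
          have hp0 : ones % 2 = 0 := by omega
          by_cases h2 : ((ones : Int) + i) % 2 = 0
          · rw [if_pos h2, if_pos (show i % 2 = 0 by omega)]
          · rw [if_neg h2, if_neg (show ¬ i % 2 = 0 by omega)]
      rw [hs]
      by_cases h2 : ((ones : Int) + i) % 2 = 0
      · rw [if_pos h2, ih]
        have : bKept (c :: cs) i ones = c :: bKept cs (i + 1) ones := by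
          simp [bKept, h1, h2]
        rw [this]
        simp
      · rw [if_neg h2, ih]
        have : bKept (c :: cs) i ones = bKept cs (i + 1) ones := by
          simp [bKept, h1, h2]
        rw [this]

-- ===== VERDICT (by name: the statement is the Claim_ definition above) =====
theorem solution_spec : Claim_equal_solution := by
  intro code _
  unfold Spec_solution solution solution_alt solutionFinish altKept
  have hA := foldl_solutionStep code.toList 0 0 []
  have hB := zip_bPref_eq_bKept code.toList 0 0
  simp only [Nat.zero_mod, List.nil_append] at hA
  rw [hA, hB]
  simp [List.length_eq_zero_iff]
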